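-- pv_equiv track=rewrite | github.com/foundev/foundev.github.io | newtitle.py | read_md_file
-- ===== SOURCE A (Python) =====
-- def read_md_file(md):
--     found_header_start = False
--     found_header = False
--     read = False
--     lines = []
--     header = ["---"]
--     title = ""
--     for line in md.split("\n"):
--         if read:
--             lines.append(line)
--         else:
--             if line == "---":
--                 if found_header_start:
--                     read = True
--                 else:
--                     found_header_start = True
--             else:
--                 if line.startswith("title:"):
--                     title_text = ":".join(line.split(":")[1:]).strip().strip("'")
--                     title = "<h1>"  + title_text + "</h1>"
--                 else:
--                     header.append(line)
--     header.append("---")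
--     header_str = "\n".join(header)
--     body_str = "\n".join(lines)
--     return header_str + "\n" +  title + "\n" + body_str
-- ===== SOURCE B (Python) =====
-- def read_md_file(md):
--     lines = md.split("\n")
--     split_idx = None
--     seen_first = False
--     for i, line in enumerate(lines):
--         if line == "---":
--             if seen_first:
--                 split_idx = i
--                 break
--             seen_first = True
--     if split_idx is None:
--         head, body = lines, []
--     else:
--         head, body = lines[:split_idx], lines[split_idx + 1:]
--     header = ["---"]
--     title = ""
--     for line in head:
--         if line == "---":
--             continue
--         if line.startswith("title:"):
--             title = "<h1>" + ":".join(line.split(":")[1:]).strip().strip("'") + "</h1>"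
--         else:
--             header.append(line)
--     header.append("---")
--     return "\n".join(header) + "\n" + title + "\n" + "\n".join(body)
-- ===== Notes on version B (the rewrite author's own statement) =====
-- stated objective: simpler
-- what changed: Replaced A's single interleaved three-flag state machine with a locate-then-process decomposition: one scan finds the second front-matter delimiter line, the input is sliced into header segment and body, and a second loop over the header segment alone extracts the title and header lines.
import Mathlib
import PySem

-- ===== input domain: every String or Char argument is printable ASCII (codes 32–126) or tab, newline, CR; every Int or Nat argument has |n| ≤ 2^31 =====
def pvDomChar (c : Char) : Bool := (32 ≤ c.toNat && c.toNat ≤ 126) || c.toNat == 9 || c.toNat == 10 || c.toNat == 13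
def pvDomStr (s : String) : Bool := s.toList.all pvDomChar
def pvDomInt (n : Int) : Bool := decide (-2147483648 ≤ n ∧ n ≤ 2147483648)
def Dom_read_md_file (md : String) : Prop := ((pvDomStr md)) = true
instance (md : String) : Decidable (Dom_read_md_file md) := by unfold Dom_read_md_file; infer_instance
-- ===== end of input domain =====

-- B replaces A's single stateful three-flag pass by locate-second-delimiter, slice, then process the
-- header segment alone (objective: simpler decomposition; same cost). Return values proved equal.

-- shared helper: md.split("\n") / line.split(":"); exact since the separator is nonempty (split? = some there)
def pySplit (s sep : String) : List String := (PySem.Str.split? s sep).getD []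

-- shared helper: the identical title expression "<h1>" + ":".join(line.split(":")[1:]).strip().strip("'") + "</h1>"
-- appearing verbatim in both Pythons
def pyTitleExpr (line : String) : String :=
  "<h1>" ++ PySem.Str.stripChars (PySem.Str.strip
      (PySem.Str.join ":" ((pySplit line ":").drop 1))) "'" ++ "</h1>"

-- ===== PORT A =====
-- state: (found_header_start, read, lines, header, title); found_header is unused in A and dropped
def stepA (st : Bool × Bool × List String × List String × String) (line : String) :
    Bool × Bool × List String × List String × String :=
  if st.2.1 then (st.1, st.2.1, st.2.2.1 ++ [line], st.2.2.2.1, st.2.2.2.2)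
  else if line == "---" then
    (if st.1 then (st.1, true, st.2.2.1, st.2.2.2.1, st.2.2.2.2)
     else (true, st.2.1, st.2.2.1, st.2.2.2.1, st.2.2.2.2))
  else if PySem.Str.startswith line "title:" then
    (st.1, st.2.1, st.2.2.1, st.2.2.2.1, pyTitleExpr line)
  else (st.1, st.2.1, st.2.2.1, st.2.2.2.1 ++ [line], st.2.2.2.2)

def read_md_file (md : String) : String :=
  let st := (pySplit md "\n").foldl stepA (false, false, [], ["---"], "")
  PySem.Str.join "\n" (st.2.2.2.1 ++ ["---"]) ++ "\n" ++ st.2.2.2.2 ++ "\n"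
    ++ PySem.Str.join "\n" st.2.2.1

-- ===== PORT B =====
-- index of the second "---" line (B's enumerate-and-break loop with the seen_first flag)
def findSplit : List String → Bool → Option Nat
  | [], _ => none
  | l :: ls, seen =>
    if l == "---" then
      (if seen then some 0 else (findSplit ls true).map (· + 1))
    else (findSplit ls seen).map (· + 1)

-- B's second loop, over the header segment only: (header, title)
def stepB (st : List String × String) (line : String) : List String × String :=
  if line == "---" then st
  else if PySem.Str.startswith line "title:" then (st.1, pyTitleExpr line)
  else (st.1 ++ [line], st.2)

def read_md_file_alt (md : String) : String :=
  let lines := pySplit md "\n"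
  let hb : List String × List String :=
    match findSplit lines false with
    | none => (lines, [])
    | some i => (lines.take i, lines.drop (i + 1))
  let st := hb.1.foldl stepB (["---"], "")
  PySem.Str.join "\n" (st.1 ++ ["---"]) ++ "\n" ++ st.2 ++ "\n" ++ PySem.Str.join "\n" hb.2

-- ===== PRECONDITION & SPEC =====
def Spec_read_md_file (md : String) (out : String) : Prop := out = read_md_file_alt md
instance (md : String) (out : String) : Decidable (Spec_read_md_file md out) := by
  unfold Spec_read_md_file; infer_instance

-- ===== CLAIM (what is proved, stated in full; the proofs are below) =====
def Claim_equal_read_md_file : Prop := ∀ (md : String), Dom_read_md_file md → Spec_read_md_file md (read_md_file md)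

-- ===== LEMMAS AND PROOFS =====
-- once read=True, A's loop only appends the remaining lines to the body accumulator
theorem loopA_read (L : List String) : ∀ (fhs : Bool) (lns header : List String) (title : String),
    L.foldl stepA (fhs, true, lns, header, title) = (fhs, true, lns ++ L, header, title) := by
  induction L with
  | nil => intro fhs lns header title; simp
  | cons l ls ih =>
    intro fhs lns header title
    simp only [List.foldl_cons, stepA, if_true]
    rw [ih]
    simp

-- A's loop from an unread state = B's decomposition: body / header / title components
theorem loopA_main (L : List String) : ∀ (fhs : Bool) (header : List String) (title : String),
    (L.foldl stepA (fhs, false, [], header, title)).2.2 =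
      (match findSplit L fhs with
      | none => (([] : List String), (L.foldl stepB (header, title)).1, (L.foldl stepB (header, title)).2)
      | some i => (L.drop (i + 1), ((L.take i).foldl stepB (header, title)).1,
          ((L.take i).foldl stepB (header, title)).2)) := by
  induction L with
  | nil => intro fhs header title; simp [findSplit]
  | cons l ls ih =>
    intro fhs header title
    by_cases hd : l = "---"
    · subst hd
      cases fhs with
      | true =>
        simp only [List.foldl_cons, stepA, findSplit]
        simp [loopA_read]
      | false =>
        have hstep : stepA (false, false, [], header, title) "---"
            = (true, false, [], header, title) := by simp [stepA]
        simp only [List.foldl_cons, hstep, findSplit]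
        rw [ih true header title]
        cases hf : findSplit ls true with
        | none => simp [stepB]
        | some i => simp [stepB]
    · have hb : (l == "---") = false := by simp [hd]
      by_cases ht : PySem.Chars.startswith l.toList ['t','i','t','l','e',':'] = true
      · have hstep : stepA (fhs, false, [], header, title) l
            = (fhs, false, [], header, pyTitleExpr l) := by simp [stepA, hb, ht]
        simp only [List.foldl_cons, hstep, findSplit, hb, if_false, Bool.false_eq_true]
        rw [ih fhs header (pyTitleExpr l)]
        cases hf : findSplit ls fhs with
        | none => simp [stepB, hb, ht]
        | some i => simp [stepB, hb, ht]
      · have hstep : stepA (fhs, false, [], header, title) l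
            = (fhs, false, [], header ++ [l], title) := by simp [stepA, hb, ht]
        simp only [List.foldl_cons, hstep, findSplit, hb, if_false, Bool.false_eq_true]
        rw [ih fhs (header ++ [l]) title]
        cases hf : findSplit ls fhs with
        | none => simp [stepB, hb, ht]
        | some i => simp [stepB, hb, ht]

-- ===== VERDICT (by name: the statement is the Claim_ definition above) =====
theorem read_md_file_spec : Claim_equal_read_md_file := by
  intro md _
  show read_md_file md = read_md_file_alt md
  have h := loopA_main (pySplit md "\n") false ["---"] ""
  cases hf : findSplit (pySplit md "\n") false with
  | none =>
    rw [hf] at h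
    simp only at h
    simp only [read_md_file, read_md_file_alt, hf]
    rw [h]
  | some i =>
    rw [hf] at h
    simp only at h
    simp only [read_md_file, read_md_file_alt, hf]
    rw [h]
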